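-- pv_equiv track=rewrite | github.com/tatianambsantos/OtimizacaoMultiobjetiva | knapsack-neighbor_search.py | best_improvement
-- ===== SOURCE A (Python) =====
-- def evaluate_solution(solution, profits, weights, Q):
--     total_profit = sum(p * s for p, s in zip(profits, solution))
--     total_weight = sum(w * s for w, s in zip(weights, solution))
--     if total_weight > Q:
--         return 0, total_weight  # Se excerder a capacidade retorna 0
--     return total_profit, total_weight
--
-- def get_neighbors(solution):
--     neighbors = []
--     for i in range(len(solution)-1):
--         neighbor = solution[:]
--         neighbor[i] = 1 - neighbor[i]
--         neighbor[i+1] = 1 - neighbor[i+1]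
--         neighbors.append(neighbor)
--     return neighbors
--
-- def best_improvement(solution, profits, weights, Q):
--     current_profit, _ = evaluate_solution(solution, profits, weights, Q)
--     best_solution = solution[:]
--     best_profit = current_profit
--     neighbors = get_neighbors(solution)
--     for neighbor in neighbors:
--         neighbor_profit, _ = evaluate_solution(neighbor, profits, weights, Q)
--         if neighbor_profit > best_profit:
--             best_solution = neighbor
--             best_profit = neighbor_profit
--     return best_solution
-- ===== SOURCE B (Python) =====
-- def best_improvement(solution, profits, weights, Q):
--     # O(n): precompute base profit/weight once, evaluate each 2-flip neighbor by an O(1) delta.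
--     n = len(solution)
--     P = sum(p * s for p, s in zip(profits, solution))
--     W = sum(w * s for w, s in zip(weights, solution))
--
--     def delta(coeffs, i):
--         return (1 - 2 * solution[i]) * coeffs[i] if i < len(coeffs) else 0
--
--     best_profit = P if W <= Q else 0
--     best_i = None
--     for i in range(n - 1):
--         np = P + delta(profits, i) + delta(profits, i + 1)
--         nw = W + delta(weights, i) + delta(weights, i + 1)
--         val = np if nw <= Q else 0
--         if val > best_profit:
--             best_profit = val
--             best_i = i
--     if best_i is None:
--         return solution[:]
--     res = solution[:]
--     res[best_i] = 1 - res[best_i]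
--     res[best_i + 1] = 1 - res[best_i + 1]
--     return res
-- ===== Notes on version B (the rewrite author's own statement) =====
-- stated objective: faster
-- what changed: Instead of materializing every 2-flip neighbor and re-summing profit/weight over the whole list for each one (O(n^2)), B computes the base profit/weight once and scores each neighbor by an O(1) delta for the two flipped positions, only building the single best neighbor at the end.
import Mathlib
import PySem

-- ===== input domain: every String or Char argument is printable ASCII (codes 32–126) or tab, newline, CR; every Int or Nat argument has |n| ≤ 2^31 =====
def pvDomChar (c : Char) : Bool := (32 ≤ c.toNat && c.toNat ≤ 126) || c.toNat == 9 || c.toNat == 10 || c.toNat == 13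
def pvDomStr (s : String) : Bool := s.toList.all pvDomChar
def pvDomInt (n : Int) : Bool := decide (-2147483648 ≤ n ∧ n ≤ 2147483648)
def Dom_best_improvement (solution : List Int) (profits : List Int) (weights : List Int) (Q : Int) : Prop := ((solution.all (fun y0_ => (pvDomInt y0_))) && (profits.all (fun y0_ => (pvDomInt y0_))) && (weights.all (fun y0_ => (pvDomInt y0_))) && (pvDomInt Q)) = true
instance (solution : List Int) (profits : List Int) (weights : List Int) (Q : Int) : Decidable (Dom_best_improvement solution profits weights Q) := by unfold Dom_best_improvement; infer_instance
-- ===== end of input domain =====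

-- B replaces A's per-neighbor full re-evaluation by a base profit/weight computed once plus
-- an O(1) delta per 2-flip neighbor (objective: faster, O(n) instead of O(n^2)).

-- ===== PORT A =====
def pvZipMulSum (xs ys : List Int) : Int :=
  ((xs.zip ys).map (fun pr => pr.1 * pr.2)).sum

def evaluate_solution (solution profits weights : List Int) (Q : Int) : Int × Int :=
  let total_profit := pvZipMulSum profits solution
  let total_weight := pvZipMulSum weights solution
  if total_weight > Q then (0, total_weight) else (total_profit, total_weight)

-- neighbor[i] = 1 - neighbor[i]
def pyFlipAt (xs : List Int) (i : Nat) : List Int :=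
  xs.set i (1 - xs.getD i 0)

def get_neighbors (solution : List Int) : List (List Int) :=
  (List.range (solution.length - 1)).map
    (fun i => pyFlipAt (pyFlipAt solution i) (i + 1))

-- the body of A's for-loop over neighbors
def stepA (profits weights : List Int) (Q : Int) (st : List Int × Int) (nb : List Int) :
    List Int × Int :=
  let neighbor_profit := (evaluate_solution nb profits weights Q).1
  if neighbor_profit > st.2 then (nb, neighbor_profit) else st

def best_improvement (solution : List Int) (profits : List Int) (weights : List Int) (Q : Int) : List Int :=
  let current_profit := (evaluate_solution solution profits weights Q).1
  let res := (get_neighbors solution).foldl (stepA profits weights Q) (solution, current_profit)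
  res.1

-- ===== PORT B =====
def altDot (xs ys : List Int) : Int :=
  (xs.zip ys).foldl (fun a pr => a + pr.1 * pr.2) 0

-- profit/weight change from flipping position i (0 if i is beyond the coefficient list)
def altDelta (solution coeffs : List Int) (i : Nat) : Int :=
  if i < coeffs.length then (1 - 2 * solution.getD i 0) * coeffs.getD i 0 else 0

def altFlipPair (xs : List Int) (i : Nat) : List Int :=
  let res := xs.set i (1 - xs.getD i 0)
  res.set (i + 1) (1 - res.getD (i + 1) 0)

-- the body of B's for-loop over indices: state = (best_profit, best_i)
def stepB (solution profits weights : List Int) (Q P W : Int) (st : Int × Option Nat)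
    (i : Nat) : Int × Option Nat :=
  let np := P + altDelta solution profits i + altDelta solution profits (i + 1)
  let nw := W + altDelta solution weights i + altDelta solution weights (i + 1)
  let val := if nw ≤ Q then np else 0
  if val > st.1 then (val, some i) else st

def best_improvement_alt (solution : List Int) (profits : List Int) (weights : List Int) (Q : Int) : List Int :=
  let n := solution.length
  let P := altDot profits solution
  let W := altDot weights solution
  let st := (List.range (n - 1)).foldl (stepB solution profits weights Q P W)
              ((if W ≤ Q then P else 0), none)
  match st.2 with
  | none => solution
  | some i => altFlipPair solution i

-- ===== PRECONDITION & SPEC =====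
def Spec_best_improvement (solution : List Int) (profits : List Int) (weights : List Int) (Q : Int) (out : List Int) : Prop := out = best_improvement_alt solution profits weights Q
instance (solution : List Int) (profits : List Int) (weights : List Int) (Q : Int) (out : List Int) : Decidable (Spec_best_improvement solution profits weights Q out) := by unfold Spec_best_improvement; infer_instance

-- ===== CLAIM (what is proved, stated in full; the proofs are below) =====
def Claim_equal_best_improvement : Prop := ∀ (solution : List Int) (profits : List Int) (weights : List Int) (Q : Int), Dom_best_improvement solution profits weights Q → Spec_best_improvement solution profits weights Q (best_improvement solution profits weights Q)

-- ===== LEMMAS AND PROOFS =====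

theorem foldl_add_mul (l : List (Int × Int)) (c : Int) :
    l.foldl (fun a pr => a + pr.1 * pr.2) c = c + (l.map (fun pr => pr.1 * pr.2)).sum := by
  induction l generalizing c with
  | nil => simp
  | cons h t ih => simp [ih]; ring

theorem altDot_eq (xs ys : List Int) : altDot xs ys = pvZipMulSum xs ys := by
  simp [altDot, pvZipMulSum, foldl_add_mul]

-- dot product after a single in-range set
theorem pvZipMulSum_set (ps xs : List Int) (j : Nat) (v : Int) (hj : j < xs.length) :
    pvZipMulSum ps (xs.set j v)
      = pvZipMulSum ps xs
        + (if j < ps.length then (v - xs.getD j 0) * ps.getD j 0 else 0) := by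
  induction ps generalizing xs j with
  | nil => simp [pvZipMulSum]
  | cons p ps ih =>
    cases xs with
    | nil => simp at hj
    | cons x xs =>
      cases j with
      | zero => simp [pvZipMulSum]; ring
      | succ j =>
        have hj' : j < xs.length := by simpa using hj
        simp only [List.set_cons_succ, pvZipMulSum, List.zip_cons_cons, List.map_cons,
          List.sum_cons, List.getD_cons_succ, List.length_cons]
        have := ih xs j hj'
        simp only [pvZipMulSum] at this
        rw [this]
        have : j + 1 < ps.length + 1 ↔ j < ps.length := by omega
        simp [this]
        split_ifs <;> ring

-- neighbor i's evaluated profit equals base + delta form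
theorem eval_neighbor (solution profits weights : List Int) (Q : Int) (i : Nat)
    (hi : i + 1 < solution.length) :
    (evaluate_solution (pyFlipAt (pyFlipAt solution i) (i + 1)) profits weights Q).1
      = (if altDot weights solution + altDelta solution weights i + altDelta solution weights (i+1) ≤ Q
         then altDot profits solution + altDelta solution profits i + altDelta solution profits (i+1)
         else 0) := by
  have hlen : (solution.set i (1 - solution.getD i 0)).length = solution.length := by simp
  have hget : (solution.set i (1 - solution.getD i 0)).getD (i+1) 0 = solution.getD (i+1) 0 := by
    simp [List.getD_eq_getElem?_getD, List.getElem?_set_ne (by omega : i ≠ i+1)]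
  have h1 : pvZipMulSum profits (pyFlipAt (pyFlipAt solution i) (i+1))
      = pvZipMulSum profits solution + altDelta solution profits i + altDelta solution profits (i+1) := by
    unfold pyFlipAt
    rw [hget, pvZipMulSum_set _ _ _ _ (by rw [hlen]; omega), hget,
        pvZipMulSum_set _ _ _ _ (by omega : i < solution.length)]
    unfold altDelta
    split_ifs <;> ring
  have h2 : pvZipMulSum weights (pyFlipAt (pyFlipAt solution i) (i+1))
      = pvZipMulSum weights solution + altDelta solution weights i + altDelta solution weights (i+1) := by
    unfold pyFlipAt
    rw [hget, pvZipMulSum_set _ _ _ _ (by rw [hlen]; omega), hget,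
        pvZipMulSum_set _ _ _ _ (by omega : i < solution.length)]
    unfold altDelta
    split_ifs <;> ring
  unfold evaluate_solution
  simp only [altDot_eq, h1, h2]
  split_ifs <;> simp <;> omega

def reprIdx (solution : List Int) (bi : Option Nat) : List Int :=
  match bi with
  | none => solution
  | some i => altFlipPair solution i

theorem fold_inv (solution profits weights : List Int) (Q : Int)
    (l : List Nat) (hl : ∀ i ∈ l, i + 1 < solution.length)
    (bp : Int) (bi : Option Nat) :
    l.foldl (fun st i => stepA profits weights Q st (pyFlipAt (pyFlipAt solution i) (i + 1)))
        (reprIdx solution bi, bp)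
      = (fun st => (reprIdx solution st.2, st.1))
          (l.foldl (stepB solution profits weights Q (altDot profits solution) (altDot weights solution)) (bp, bi)) := by
  induction l generalizing bp bi with
  | nil => rfl
  | cons i l ih =>
    have hi : i + 1 < solution.length := hl i (by simp)
    have hrest : ∀ j ∈ l, j + 1 < solution.length := fun j hj => hl j (by simp [hj])
    have hstep : stepA profits weights Q (reprIdx solution bi, bp) (pyFlipAt (pyFlipAt solution i) (i + 1))
        = (reprIdx solution (stepB solution profits weights Q (altDot profits solution) (altDot weights solution) (bp, bi) i).2,
           (stepB solution profits weights Q (altDot profits solution) (altDot weights solution) (bp, bi) i).1) := by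
      simp only [stepA, stepB, eval_neighbor solution profits weights Q i hi]
      split_ifs <;> rfl
    simp only [List.foldl_cons, hstep]
    exact ih hrest _ _

theorem main_eq (solution profits weights : List Int) (Q : Int) :
    best_improvement solution profits weights Q = best_improvement_alt solution profits weights Q := by
  simp only [best_improvement, best_improvement_alt, get_neighbors, List.foldl_map]
  have hcur : (evaluate_solution solution profits weights Q).1
      = (if altDot weights solution ≤ Q then altDot profits solution else 0) := by
    simp only [evaluate_solution, altDot_eq]
    split_ifs <;> simp <;> omega
  have hl : ∀ i ∈ List.range (solution.length - 1), i + 1 < solution.length := by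
    intro i hi; simp [List.mem_range] at hi; omega
  have := fold_inv solution profits weights Q (List.range (solution.length - 1)) hl
      (if altDot weights solution ≤ Q then altDot profits solution else 0) none
  simp only [reprIdx] at this
  rw [hcur, this]

-- ===== VERDICT (by name: the statement is the Claim_ definition above) =====
theorem best_improvement_spec : Claim_equal_best_improvement := by
  intro solution profits weights Q _
  unfold Spec_best_improvement
  exact main_eq solution profits weights Q
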